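-- pv_equiv track=rewrite | github.com/brianmaxwell515/Johnson-s-Algorithm-For-Scheduling-Practice | scheduling_project_performance_test.py | in_and_out_process
-- ===== SOURCE A (Python) =====
-- def in_and_out_process(machine, machine_order):
--     machine_order = [x-1 for x in machine_order]
--     intime = [0]*len(machine)
--     # outime = [0]*len(machine)
--     for i in range(len(machine[0])):
--         for j in range(len(machine)):
--             current_process = machine[j][machine_order[i]]
--             if j > 0:
--                 if intime[j] < intime[j-1]:
--                     intime[j] = intime[j-1]
--             intime[j] += current_process
--     makespan = max(intime)
--     return makespan
-- ===== SOURCE B (Python) =====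
-- def in_and_out_process(machine, machine_order):
--     # Critical-path split identity: C[i][j] = max_{k<=i} (C[k][j-1] + sum_{t=k..i} p_j(t)),
--     # computed per machine from prefix sums with a Kadane-style running maximum,
--     # instead of cell-by-cell max(left, above)+cost updates.
--     jobs = [machine_order[i] - 1 for i in range(len(machine[0]))]
--     n = len(jobs)
--     # machine 0: its completion row is the prefix sums of its times in job order
--     prev = []
--     acc = 0
--     for g in jobs:
--         acc += machine[0][g]
--         prev.append(acc)
--     finals = [prev[-1]] if prev else [0]
--     # later machines: C[i] = max_{k<=i}(prev[k] - P[k-1]) + P[i], via a running max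
--     for row in machine[1:]:
--         cur = []
--         run = 0
--         acc = 0
--         for i in range(n):
--             run = max(run, prev[i] - acc)
--             acc += row[jobs[i]]
--             cur.append(run + acc)
--         prev = cur
--         finals.append(cur[-1] if cur else 0)
--     return max(finals)
-- ===== Notes on version B (the rewrite author's own statement) =====
-- stated objective: alternative
-- what changed: A fills a per-machine completion array with cell-by-cell max(left, above)+cost updates; B instead uses the critical-path split identity C[i][j] = max_{k<=i}(C[k][j-1] + sum_{t=k..i} p_j(t)), computing each machine's completion row from prefix sums of its processing times with a Kadane-style running maximum (run = max(run, prev[k] - P[k-1]); C[i] = run + P[i]), then takes the max of the rows' last entries.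
import Mathlib
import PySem

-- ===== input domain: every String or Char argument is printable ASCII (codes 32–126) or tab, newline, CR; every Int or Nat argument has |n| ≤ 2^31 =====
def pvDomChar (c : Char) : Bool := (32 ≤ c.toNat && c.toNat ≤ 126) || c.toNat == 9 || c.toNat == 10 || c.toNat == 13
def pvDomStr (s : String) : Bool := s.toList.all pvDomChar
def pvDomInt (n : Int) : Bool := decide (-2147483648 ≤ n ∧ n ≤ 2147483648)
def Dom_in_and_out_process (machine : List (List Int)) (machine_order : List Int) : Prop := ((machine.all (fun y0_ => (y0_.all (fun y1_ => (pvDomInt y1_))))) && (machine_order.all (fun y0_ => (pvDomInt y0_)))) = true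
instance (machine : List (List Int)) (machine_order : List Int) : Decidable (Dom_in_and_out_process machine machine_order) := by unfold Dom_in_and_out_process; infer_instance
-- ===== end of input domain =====

-- B replaces A's cell-by-cell max(left, above)+cost table updates by the critical-path
-- split identity C[i][j] = max_{k<=i} (C[k][j-1] + sum_{t=k..i} p_j(t)), computed per
-- machine from prefix sums with a Kadane-style running maximum. Objective: alternative.


-- ===== PORT A =====
def in_and_out_process (machine : List (List Int)) (machine_order : List Int) : Int :=
  let order := machine_order.map (fun x => x - 1)
  let intime0 : List Int := List.replicate machine.length 0
  let final := (PySem.List.pyRange 0 ((PySem.List.pyGetD machine 0 []).length : Int) 1).foldl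
    (fun intime i =>
      (PySem.List.pyRange 0 (machine.length : Int) 1).foldl
        (fun intime j =>
          let current := PySem.List.pyGetD (PySem.List.pyGetD machine j []) (PySem.List.pyGetD order i 0) 0
          let intime :=
            if 0 < j then
              if PySem.List.pyGetD intime j 0 < PySem.List.pyGetD intime (j - 1) 0 then
                PySem.List.pySetD intime j (PySem.List.pyGetD intime (j - 1) 0)
              else intime
            else intime
          PySem.List.pySetD intime j (PySem.List.pyGetD intime j 0 + current))
        intime)
    intime0
  (PySem.List.max? final (fun x => x)).getD 0

-- ===== PORT B =====
def in_and_out_process_alt (machine : List (List Int)) (machine_order : List Int) : Int :=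
  let n : Nat := (PySem.List.pyGetD machine 0 []).length
  let jobs := (PySem.List.pyRange 0 (n : Int) 1).map (fun i => PySem.List.pyGetD machine_order i 0 - 1)
  -- machine 0: its completion row is the prefix sums of its times in job order
  let pa := jobs.foldl
      (fun (st : List Int × Int) g =>
        let acc := st.2 + PySem.List.pyGetD (PySem.List.pyGetD machine 0 []) g 0
        (st.1 ++ [acc], acc))
      ([], 0)
  let prev := pa.1
  let finals : List Int := if prev ≠ [] then [PySem.List.pyGetD prev (-1) 0] else [0]
  -- later machines: C[i] = max_{k<=i}(prev[k] - P[k-1]) + P[i], via a running max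
  let res := (PySem.List.slice machine (some 1) none).foldl
      (fun (st : List Int × List Int) row =>
        let cra := (PySem.List.pyRange 0 (n : Int) 1).foldl
          (fun (c : List Int × Int × Int) i =>
            let run := max c.2.1 (PySem.List.pyGetD st.1 i 0 - c.2.2)
            let acc := c.2.2 + PySem.List.pyGetD row (PySem.List.pyGetD jobs i 0) 0
            (c.1 ++ [run + acc], run, acc))
          ([], 0, 0)
        (cra.1, st.2 ++ [if cra.1 ≠ [] then PySem.List.pyGetD cra.1 (-1) 0 else 0]))
      (prev, finals)
  (PySem.List.max? res.2 (fun x => x)).getD 0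

-- ===== PRECONDITION & SPEC =====
-- Pre_ = exactly where Python A returns: machine nonempty (machine[0]), machine_order long
-- enough for the len(machine[0]) jobs read from it, and every used (1-based, possibly
-- negatively wrapping) job index valid in every row (else IndexError).
def Pre_in_and_out_process (machine : List (List Int)) (machine_order : List Int) : Prop :=
  machine ≠ [] ∧
  (machine.headD []).length ≤ machine_order.length ∧
  ∀ row ∈ machine, ∀ k ∈ List.range (machine.headD []).length,
    PySem.Raise.InRange row.length (machine_order.getD k 0 - 1)
instance (machine : List (List Int)) (machine_order : List Int) : Decidable (Pre_in_and_out_process machine machine_order) := by unfold Pre_in_and_out_process; infer_instance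

def pvWitness_in_and_out_process : List (List Int) × List Int := ([[1, 2], [3, 4]], [2, 1])

def Spec_in_and_out_process (machine : List (List Int)) (machine_order : List Int) (out : Int) : Prop := out = in_and_out_process_alt machine machine_order
instance (machine : List (List Int)) (machine_order : List Int) (out : Int) : Decidable (Spec_in_and_out_process machine machine_order out) := by unfold Spec_in_and_out_process; infer_instance

-- ===== CLAIM (what is proved, stated in full; the proofs are below) =====
def Claim_equal_in_and_out_process : Prop := ∀ (machine : List (List Int)) (machine_order : List Int), Dom_in_and_out_process machine machine_order → Pre_in_and_out_process machine machine_order → Spec_in_and_out_process machine machine_order (in_and_out_process machine machine_order)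

-- ===== LEMMAS AND PROOFS =====

theorem set_map_range {m j : Nat} (h : Nat → Int) (v : Int) (hj : j < m) :
    ((List.range m).map h).set j v =
      (List.range m).map (fun x => if x = j then v else h x) := by
  apply List.ext_getElem
  · simp
  · intro k hk1 hk2
    rcases eq_or_ne k j with rfl | hne
    · simp [List.getElem_set_self]
    · rw [List.getElem_set_ne (by omega)]
      simp [hne]

def rowSum (pr : Nat → Int) : Nat → Int
  | 0 => pr 0
  | k + 1 => rowSum pr k + pr (k + 1)
def rowC (pr : Nat → Int) (prev : Nat → Int) : Nat → Int
  | 0 => max 0 (prev 0) + pr 0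
  | k + 1 => max (rowC pr prev k) (prev (k + 1)) + pr (k + 1)
def Ctab (pr : Nat → Nat → Int) : Nat → Nat → Int
  | 0 => rowSum (pr 0)
  | j + 1 => rowC (pr (j + 1)) (Ctab pr j)
def newRow (pr : Nat → Int) (g : Nat → Int) : Nat → Int
  | 0 => g 0 + pr 0
  | j + 1 => max (g (j + 1)) (newRow pr g j) + pr (j + 1)
def Gfun (pr : Nat → Nat → Int) : Nat → Nat → Int
  | 0 => fun _ => 0
  | i + 1 => newRow (fun j => pr j i) (Gfun pr i)

theorem newRow_Ctab (pr : Nat → Nat → Int) (i : Nat) (g : Nat → Int)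
    (hg : ∀ j', g j' = if i = 0 then 0 else Ctab pr j' (i - 1)) (j : Nat) :
    newRow (fun j' => pr j' i) g j = Ctab pr j i := by
  induction j with
  | zero =>
    cases i with
    | zero => simp [newRow, Ctab, rowSum, hg]
    | succ i' => cases i' <;> simp [newRow, Ctab, rowSum, hg]
  | succ j ih =>
    cases i with
    | zero => simp [newRow, Ctab, rowC, hg, ih]
    | succ i' => simp [newRow, Ctab, rowC, hg, ih]

theorem Gfun_eq (pr : Nat → Nat → Int) (i j : Nat) :
    Gfun pr i j = if i = 0 then 0 else Ctab pr j (i - 1) := by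
  induction i generalizing j with
  | zero => simp [Gfun]
  | succ i ih => simp [Gfun, newRow_Ctab pr i (Gfun pr i) (fun j' => ih j')]

theorem getD_map_range' {m k : Nat} (h : Nat → Int) (hk : k < m) :
    ((List.range m).map h).getD k 0 = h k := by
  rw [List.getD_eq_getElem?_getD]
  simp [hk]

theorem A_inner_gen (m : Nat) (pr g : Nat → Int)
    (step : List Int → Int → List Int)
    (hstep : ∀ (s : List Int) (j : Int), 0 ≤ j → j < (m : Int) → step s j =
      (fun intime =>
        let intime :=
          if 0 < j then
            if PySem.List.pyGetD intime j 0 < PySem.List.pyGetD intime (j - 1) 0 then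
              PySem.List.pySetD intime j (PySem.List.pyGetD intime (j - 1) 0)
            else intime
          else intime
        PySem.List.pySetD intime j (PySem.List.pyGetD intime j 0 + pr j.toNat)) s) :
    ∀ j0, j0 ≤ m → (PySem.List.pyRange 0 (j0 : Int) 1).foldl step ((List.range m).map g) =
      (List.range m).map (fun x => if x < j0 then newRow pr g x else g x) := by
  intro j0
  induction j0 with
  | zero => intro _; simp [PySem.List.pyRange_one_eq_nil]
  | succ j' ih =>
    intro hle
    have hlt : j' < m := by omega
    have hcast : ((j' + 1 : Nat) : Int) = (j' : Int) + 1 := by push_cast; ring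
    rw [hcast, PySem.List.pyRange_one_succ_right (by positivity), List.foldl_append,
      ih (by omega)]
    set h : Nat → Int := fun x => if x < j' then newRow pr g x else g x with hh
    simp only [List.foldl_cons, List.foldl_nil]
    rw [hstep _ _ (by positivity) (by exact_mod_cast hlt)]
    cases j'0 : j' with
    | zero =>
      subst j'0
      simp only [show ¬ (0 : Int) < (0:Nat) by simp]
      rw [if_neg (by simp)]
      rw [PySem.List.pyGetD_natCast, PySem.List.pySetD_natCast, getD_map_range' h hlt,
        set_map_range h _ hlt]
      apply List.map_congr_left
      intro x hx
      simp only [List.mem_range] at hx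
      rcases Nat.lt_or_ge x 1 with h1 | h1
      · interval_cases x
        simp [hh, newRow]
      · have hx0 : x ≠ 0 := by omega
        simp [hh, hx0]
    | succ j'' =>
      subst j'0
      have hpos : (0:Int) < ((j''+1 : Nat) : Int) := by positivity
      have hsub : ((j''+1 : Nat) : Int) - 1 = ((j'' : Nat) : Int) := by push_cast; ring
      have e1 : PySem.List.pyGetD ((List.range m).map h) (((j''+1 : Nat) : Int)) 0 = g (j''+1) := by
        rw [PySem.List.pyGetD_natCast, getD_map_range' h hlt]; simp [hh]
      have e2 : PySem.List.pyGetD ((List.range m).map h) (((j''+1 : Nat) : Int) - 1) 0 = newRow pr g j'' := by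
        rw [hsub, PySem.List.pyGetD_natCast, getD_map_range' h (by omega)]; simp [hh]
      simp only [if_pos hpos, e1, e2]
      by_cases hc : g (j'' + 1) < newRow pr g j''
      · simp only [if_pos hc, PySem.List.pySetD_natCast, set_map_range h _ hlt,
          PySem.List.pyGetD_natCast]
        set h2 : Nat → Int := fun x => if x = j'' + 1 then newRow pr g j'' else h x with hh2
        rw [getD_map_range' h2 hlt, set_map_range h2 _ hlt]
        apply List.map_congr_left
        intro x hx
        simp only [List.mem_range] at hx
        by_cases hx1 : x = j'' + 1
        · subst hx1
          simp [hh2, newRow, max_eq_right (le_of_lt hc)]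
        · by_cases hx2 : x < j'' + 1 <;> simp [hh2, hh, hx1] <;> omega
      · simp only [if_neg hc, PySem.List.pySetD_natCast, e1]
        rw [set_map_range h _ hlt]
        apply List.map_congr_left
        intro x hx
        simp only [List.mem_range] at hx
        by_cases hx1 : x = j'' + 1
        · subst hx1
          simp [newRow, max_eq_left (le_of_not_gt hc)]
        · by_cases hx2 : x < j'' + 1 <;> simp [hh, hx1] <;> omega

theorem jobs_lookup (mo : List Int) (n k : Nat) (hk : k < n) :
    PySem.List.pyGetD ((PySem.List.pyRange 0 (n : Int) 1).map
      (fun i => PySem.List.pyGetD mo i 0 - 1)) (k : Int) 0 = mo.getD k 0 - 1 := by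
  rw [PySem.List.pyGetD_map_pyRange _ n k _ hk]
  rw [PySem.List.pyGetD_natCast]

def pjob (machine : List (List Int)) (mo : List Int) (j k : Nat) : Int :=
  PySem.List.pyGetD (machine.getD j []) (mo.getD k 0 - 1) 0

-- B-side: prefix sums and the running maximum
def psum (p : Nat → Int) : Nat → Int
  | 0 => 0
  | k + 1 => psum p k + p k
def runv (prevf p : Nat → Int) : Nat → Int
  | 0 => 0
  | k + 1 => max (runv prevf p k) (prevf k - psum p k)

theorem runv_rowC (prevf p : Nat → Int) (k : Nat) :
    runv prevf p (k + 1) + psum p (k + 1) = rowC p prevf k := by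
  induction k with
  | zero => simp [runv, psum, rowC]
  | succ k ih => simp only [runv, psum, rowC] at *; omega

theorem rowSum_psum (p : Nat → Int) (k : Nat) : rowSum p k = psum p (k + 1) := by
  induction k with
  | zero => simp [rowSum, psum]
  | succ k ih => simp [rowSum, psum, ih]

theorem pyGetD_last_map_range (h : Nat → Int) (n : Nat) (hn : 0 < n) :
    PySem.List.pyGetD ((List.range n).map h) (-1) 0 = h (n - 1) := by
  have hne : (List.range n).map h ≠ [] := by
    simp [List.map_eq_nil_iff, List.range_eq_nil]; omega
  rw [PySem.List.pyGetD_neg_one _ _ hne, List.getLast_eq_getElem]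
  simp

theorem B_inner (n : Nat) (prevf p : Nat → Int)
    (f : List Int × Int × Int → Int → List Int × Int × Int)
    (hf : ∀ (c : List Int × Int × Int) (i : Int), 0 ≤ i → i < (n : Int) →
      f c i =
        (c.1 ++ [max c.2.1 (prevf i.toNat - c.2.2) + (c.2.2 + p i.toNat)],
         max c.2.1 (prevf i.toNat - c.2.2), c.2.2 + p i.toNat)) :
    ∀ i0, i0 ≤ n → (PySem.List.pyRange 0 (i0 : Int) 1).foldl f ([], 0, 0) =
      ((List.range i0).map (rowC p prevf), runv prevf p i0, psum p i0) := by
  intro i0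
  induction i0 with
  | zero => intro _; simp [PySem.List.pyRange_one_eq_nil, runv, psum]
  | succ k ih =>
    intro hle
    have hcast : ((k + 1 : Nat) : Int) = (k : Int) + 1 := by push_cast; ring
    rw [hcast, PySem.List.pyRange_one_succ_right (by positivity), List.foldl_append,
      ih (by omega)]
    simp only [List.foldl_cons, List.foldl_nil]
    rw [hf _ _ (by positivity) (by exact_mod_cast Nat.lt_of_lt_of_le (Nat.lt_succ_self k) hle)]
    simp only [Int.toNat_natCast]
    have h2 := runv_rowC prevf p k
    simp only [runv, psum] at h2
    simp [List.range_succ, runv, psum, h2]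

theorem B_first (machine : List (List Int)) (mo : List Int) (n : Nat)
    (g : Nat → Int) (hg : ∀ k, k < n → g k = pjob machine mo 0 k) :
    ∀ i0, i0 ≤ n → (List.range i0).foldl
      (fun (st : List Int × Int) k =>
        (st.1 ++ [st.2 + g k], st.2 + g k))
      ([], 0) =
      ((List.range i0).map (rowSum (pjob machine mo 0)), psum (pjob machine mo 0) i0) := by
  intro i0
  induction i0 with
  | zero => intro _; simp [psum]
  | succ k ih =>
    intro hle
    rw [List.range_succ, List.foldl_append, ih (by omega)]
    simp only [List.foldl_cons, List.foldl_nil, List.map_append, List.map_cons, List.map_nil]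
    rw [hg k (by omega)]
    refine Prod.ext ?_ ?_
    · congr 1
      simp [rowSum_psum, psum]
    · simp [psum]

theorem headD_eq_getD (machine : List (List Int)) :
    machine.headD [] = machine.getD 0 [] := by
  cases machine <;> rfl

theorem B_outer (machine : List (List Int)) (mo : List Int) (n : Nat) :
    ∀ (rows : List (List Int)) (j0 : Nat), 1 ≤ j0 → j0 ≤ machine.length →
      machine.drop j0 = rows →
      rows.foldl
        (fun (st : List Int × List Int) row =>
          let cra := (PySem.List.pyRange 0 (n : Int) 1).foldl
            (fun (c : List Int × Int × Int) i =>
              let run := max c.2.1 (PySem.List.pyGetD st.1 i 0 - c.2.2)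
              let acc := c.2.2 + PySem.List.pyGetD row
                (PySem.List.pyGetD ((PySem.List.pyRange 0 (n : Int) 1).map
                  (fun i' => PySem.List.pyGetD mo i' 0 - 1)) i 0) 0
              (c.1 ++ [run + acc], run, acc))
            ([], 0, 0)
          (cra.1, st.2 ++ [if cra.1 ≠ [] then PySem.List.pyGetD cra.1 (-1) 0 else 0]))
        ((List.range n).map (Ctab (pjob machine mo) (j0 - 1)),
         (List.range j0).map (fun j => if n = 0 then 0 else Ctab (pjob machine mo) j (n - 1)))
      = ((List.range n).map (Ctab (pjob machine mo) (machine.length - 1)),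
         (List.range machine.length).map
           (fun j => if n = 0 then 0 else Ctab (pjob machine mo) j (n - 1))) := by
  intro rows
  induction rows with
  | nil =>
    intro j0 h1 h2 hdrop
    have hle : machine.length ≤ j0 := List.drop_eq_nil_iff.mp hdrop
    have hj0 : j0 = machine.length := by omega
    subst hj0
    simp
  | cons r rest ih =>
    intro j0 h1 h2 hdrop
    obtain ⟨j1, rfl⟩ : ∃ j1, j0 = j1 + 1 := ⟨j0 - 1, by omega⟩
    have h0 : machine[j1 + 1]? = some r := by
      have h1' := congrArg (fun l => l[0]?) hdrop
      simpa using h1'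
    have hr : machine.getD (j1 + 1) [] = r := by
      simp [List.getD_eq_getElem?_getD, h0]
    have hrest : machine.drop (j1 + 1 + 1) = rest := by
      have h1' : List.drop 1 (machine.drop (j1 + 1)) = rest := by rw [hdrop]; rfl
      rw [List.drop_drop] at h1'
      exact h1'
    have hlt : j1 + 1 < machine.length := (List.getElem?_eq_some_iff.mp h0).1
    rw [List.foldl_cons]
    have hstep_inner :
        (PySem.List.pyRange 0 (n : Int) 1).foldl
          (fun (c : List Int × Int × Int) i =>
            let run := max c.2.1
              (PySem.List.pyGetD ((List.range n).map (Ctab (pjob machine mo) (j1 + 1 - 1))) i 0 - c.2.2)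
            let acc := c.2.2 + PySem.List.pyGetD r
              (PySem.List.pyGetD ((PySem.List.pyRange 0 (n : Int) 1).map
                (fun i' => PySem.List.pyGetD mo i' 0 - 1)) i 0) 0
            (c.1 ++ [run + acc], run, acc))
          ([], 0, 0)
        = ((List.range n).map (rowC (pjob machine mo (j1 + 1)) (Ctab (pjob machine mo) j1)),
           runv (Ctab (pjob machine mo) j1) (pjob machine mo (j1 + 1)) n,
           psum (pjob machine mo (j1 + 1)) n) := by
      apply B_inner n (Ctab (pjob machine mo) j1) (pjob machine mo (j1 + 1)) _ ?_ n le_rfl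
      intro c i hi0 hin
      obtain ⟨k', rfl⟩ : ∃ k' : Nat, (k' : Int) = i := ⟨i.toNat, by omega⟩
      have hk'n : k' < n := by exact_mod_cast hin
      simp only [show j1 + 1 - 1 = j1 from rfl]
      rw [PySem.List.pyGetD_natCast, getD_map_range' _ hk'n, jobs_lookup mo n k' hk'n,
        Int.toNat_natCast]
      have hr' : machine[j1 + 1]?.getD [] = r := by rw [← List.getD_eq_getElem?_getD]; exact hr
      simp [pjob, hr']
    simp only [hstep_inner]
    have hCt : (List.range n).map (rowC (pjob machine mo (j1 + 1)) (Ctab (pjob machine mo) j1))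
        = (List.range n).map (Ctab (pjob machine mo) (j1 + 1)) := rfl
    have hlast : (if ((List.range n).map (rowC (pjob machine mo (j1 + 1)) (Ctab (pjob machine mo) j1))) ≠ []
          then PySem.List.pyGetD ((List.range n).map (rowC (pjob machine mo (j1 + 1)) (Ctab (pjob machine mo) j1))) (-1) 0
          else 0)
        = (if n = 0 then 0 else Ctab (pjob machine mo) (j1 + 1) (n - 1)) := by
      rcases Nat.eq_zero_or_pos n with rfl | hn
      · simp
      · rw [if_pos (by simp [List.map_eq_nil_iff, List.range_eq_nil]; omega),
          pyGetD_last_map_range _ n hn, if_neg (by omega)]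
        rfl
    rw [hlast]
    have hfin : ((List.range (j1 + 1)).map
          (fun j => if n = 0 then 0 else Ctab (pjob machine mo) j (n - 1))) ++
          [if n = 0 then 0 else Ctab (pjob machine mo) (j1 + 1) (n - 1)]
        = (List.range (j1 + 1 + 1)).map
          (fun j => if n = 0 then 0 else Ctab (pjob machine mo) j (n - 1)) := by
      conv_rhs => rw [List.range_succ, List.map_append]
      simp
    have := ih (j1 + 1 + 1) (by omega) (by omega) hrest
    simp only [show j1 + 1 + 1 - 1 = j1 + 1 from rfl] at this
    simp only [hCt, hfin]
    exact this

theorem order_lookup (mo : List Int) (i : Nat) (hi : i < mo.length) :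
    PySem.List.pyGetD (mo.map (fun x => x - 1)) (i : Int) 0 = mo.getD i 0 - 1 := by
  rw [PySem.List.pyGetD_natCast, List.getD_eq_getElem?_getD, List.getD_eq_getElem?_getD,
    List.getElem?_map, List.getElem?_eq_getElem hi]
  simp

theorem A_outer (machine : List (List Int)) (mo : List Int) (n : Nat)
    (hmo : n ≤ mo.length) :
    ∀ i0, i0 ≤ n →
      (PySem.List.pyRange 0 (i0 : Int) 1).foldl
        (fun intime i =>
          (PySem.List.pyRange 0 (machine.length : Int) 1).foldl
            (fun intime j =>
              let current := PySem.List.pyGetD (PySem.List.pyGetD machine j [])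
                (PySem.List.pyGetD (mo.map (fun x => x - 1)) i 0) 0
              let intime :=
                if 0 < j then
                  if PySem.List.pyGetD intime j 0 < PySem.List.pyGetD intime (j - 1) 0 then
                    PySem.List.pySetD intime j (PySem.List.pyGetD intime (j - 1) 0)
                  else intime
                else intime
              PySem.List.pySetD intime j (PySem.List.pyGetD intime j 0 + current))
            intime)
        ((List.range machine.length).map (fun _ => 0))
      = (List.range machine.length).map (Gfun (pjob machine mo) i0) := by
  intro i0
  induction i0 with
  | zero => intro _; simp [PySem.List.pyRange_one_eq_nil, Gfun]
  | succ i0 ih =>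
    intro hle
    have hcast : ((i0 + 1 : Nat) : Int) = (i0 : Int) + 1 := by push_cast; ring
    rw [hcast, PySem.List.pyRange_one_succ_right (by positivity), List.foldl_append,
      ih (by omega)]
    simp only [List.foldl_cons, List.foldl_nil]
    rw [A_inner_gen machine.length (fun j => pjob machine mo j i0) (Gfun (pjob machine mo) i0)
      _ ?hstep machine.length le_rfl]
    · apply List.map_congr_left
      intro x hx
      simp only [List.mem_range] at hx
      simp [hx, Gfun]
    case hstep =>
      intro s j hj0 hjm
      obtain ⟨j', rfl⟩ : ∃ j' : Nat, (j' : Int) = j := ⟨j.toNat, by omega⟩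
      have hj'm : j' < machine.length := by exact_mod_cast hjm
      simp only []
      rw [order_lookup mo i0 (by omega)]
      rw [PySem.List.pyGetD_natCast machine, Int.toNat_natCast]
      rfl

-- ===== VERDICT (by name: the statement is the Claim_ definition above) =====
theorem in_and_out_process_spec : Claim_equal_in_and_out_process := by
  intro machine mo _ hpre
  obtain ⟨hne, hmo, -⟩ := hpre
  have hm : 0 < machine.length := List.length_pos_iff.mpr hne
  rw [headD_eq_getD] at hmo
  have hn0 : PySem.List.pyGetD machine 0 [] = machine.getD 0 [] :=
    PySem.List.pyGetD_zero machine []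
  unfold Spec_in_and_out_process in_and_out_process in_and_out_process_alt
  simp only [hn0]
  set n := (machine.getD 0 []).length with hn
  set pr := pjob machine mo with hpr
  set F : Nat → Int := fun j => if n = 0 then 0 else Ctab pr j (n - 1) with hF
  -- A side
  have hrep : List.replicate machine.length (0 : Int) =
      (List.range machine.length).map (fun _ => 0) := by
    rw [List.map_const']
    simp
  rw [hrep, A_outer machine mo n hmo n le_rfl]
  have hGF : (List.range machine.length).map (Gfun pr n) =
      (List.range machine.length).map F := by
    apply List.map_congr_left
    intro x _
    rw [Gfun_eq, hF]
  rw [hGF]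
  -- B side: first machine's prefix-sum fold (fold over jobs = fold over range n)
  have hjobs : ((PySem.List.pyRange 0 (n : Int) 1).map
      (fun i => PySem.List.pyGetD mo i 0 - 1)).foldl
      (fun (st : List Int × Int) g =>
        (st.1 ++ [st.2 + PySem.List.pyGetD (machine.getD 0 []) g 0],
         st.2 + PySem.List.pyGetD (machine.getD 0 []) g 0))
      ([], 0) =
      ((List.range n).map (rowSum (pr 0)), psum (pr 0) n) := by
    rw [List.foldl_map]
    have hrw : ∀ (st : List Int × Int), ∀ i ∈ PySem.List.pyRange 0 (n : Int) 1,
        (st.1 ++ [st.2 + PySem.List.pyGetD (machine.getD 0 [])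
            (PySem.List.pyGetD mo i 0 - 1) 0],
         st.2 + PySem.List.pyGetD (machine.getD 0 [])
            (PySem.List.pyGetD mo i 0 - 1) 0) =
        (st.1 ++ [st.2 + pr 0 i.toNat], st.2 + pr 0 i.toNat) := by
      intro st i hi
      rw [PySem.List.mem_pyRange_one] at hi
      obtain ⟨k', rfl⟩ : ∃ k' : Nat, (k' : Int) = i := ⟨i.toNat, by omega⟩
      rw [PySem.List.pyGetD_natCast, Int.toNat_natCast]
      rfl
    rw [PySem.List.foldl_congr_mem _ _ _ _ hrw]
    rw [PySem.List.pyRange_zero_nat, List.foldl_map]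
    have := B_first machine mo n (fun k => pr 0 k) (fun k _ => rfl) n le_rfl
    simp only [Int.toNat_natCast] at *
    exact this
  rw [hjobs]
  have hCt0 : (List.range n).map (rowSum (pr 0)) = (List.range n).map (Ctab pr 0) := rfl
  rw [hCt0]
  -- initial finals = [F 0]
  have hfin0 : (if ((List.range n).map (Ctab pr 0)) ≠ []
        then [PySem.List.pyGetD ((List.range n).map (Ctab pr 0)) (-1) 0] else [0])
      = (List.range 1).map F := by
    by_cases hz : n = 0
    · simp [hz, hF]
    · rw [if_pos (by simp [List.map_eq_nil_iff, List.range_eq_nil]; omega),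
        pyGetD_last_map_range _ n (by omega)]
      simp [hF, hz]
  rw [hfin0]
  have hslice : PySem.List.slice machine (some 1) none = machine.drop 1 := by
    rw [PySem.List.slice_from machine (by norm_num)]
    rfl
  rw [hslice]
  have hbo := B_outer machine mo n (machine.drop 1) 1 le_rfl hm rfl
  rw [← hpr] at hbo
  simp only [Nat.sub_self] at hbo
  rw [← hF] at hbo
  rw [hbo]
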